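-- pv_equiv track=rewrite | github.com/hkassaei/agentic-network-ops | agentic_chaos/recorder.py | _infer_failure_domain
-- ===== SOURCE A (Python) =====
-- def _infer_failure_domain(scenario: dict) -> str:
--     """Infer the failure domain from the scenario's targets."""
--     targets = set()
--     for f in scenario.get("faults", []):
--         targets.add(f.get("target", ""))
--
--     ims_signaling_nfs = {"pcscf", "icscf", "scscf", "pyhss"}
--     media_nfs = {"rtpengine"}
--     core_nfs = {"amf", "smf", "upf", "nrf", "scp", "ausf", "udm", "udr", "pcf"}
--     data_nfs = {"mongo", "mysql", "dns"}
--
--     if targets & media_nfs: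
--         return "ims_media"
--     if targets & ims_signaling_nfs:
--         return "ims_signaling"
--     if targets & {"upf", "nr_gnb"}:
--         return "data_plane"
--     if targets & core_nfs:
--         return "core_control_plane"
--     if targets & data_nfs:
--         return "data_layer"
--     return "unknown"
-- ===== SOURCE B (Python) =====
-- _RANK = {
--     "rtpengine": (0, "ims_media"),
--     "pcscf": (1, "ims_signaling"),
--     "icscf": (1, "ims_signaling"),
--     "scscf": (1, "ims_signaling"),
--     "pyhss": (1, "ims_signaling"),
--     "upf": (2, "data_plane"),
--     "nr_gnb": (2, "data_plane"),
--     "amf": (3, "core_control_plane"),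
--     "smf": (3, "core_control_plane"),
--     "nrf": (3, "core_control_plane"),
--     "scp": (3, "core_control_plane"),
--     "ausf": (3, "core_control_plane"),
--     "udm": (3, "core_control_plane"),
--     "udr": (3, "core_control_plane"),
--     "pcf": (3, "core_control_plane"),
--     "mongo": (4, "data_layer"),
--     "mysql": (4, "data_layer"),
--     "dns": (4, "data_layer"),
-- }
--
--
-- def _infer_failure_domain(scenario: dict) -> str:
--     """Infer the failure domain from the scenario's targets."""
--     best = None
--     for f in scenario.get("faults", []):
--         e = _RANK.get(f.get("target", ""))
--         if e is not None and (best is None or e[0] < best[0]):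
--             best = e
--     return "unknown" if best is None else best[1]
-- ===== Notes on version B (the rewrite author's own statement) =====
-- stated objective: simpler
-- what changed: Replaced the build-a-set-then-five-ordered-intersection-tests cascade with one rank table (target -> (priority, domain), upf ranked with data_plane to mirror the original branch order) and a single min-by-rank pass over the faults.
import Mathlib
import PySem

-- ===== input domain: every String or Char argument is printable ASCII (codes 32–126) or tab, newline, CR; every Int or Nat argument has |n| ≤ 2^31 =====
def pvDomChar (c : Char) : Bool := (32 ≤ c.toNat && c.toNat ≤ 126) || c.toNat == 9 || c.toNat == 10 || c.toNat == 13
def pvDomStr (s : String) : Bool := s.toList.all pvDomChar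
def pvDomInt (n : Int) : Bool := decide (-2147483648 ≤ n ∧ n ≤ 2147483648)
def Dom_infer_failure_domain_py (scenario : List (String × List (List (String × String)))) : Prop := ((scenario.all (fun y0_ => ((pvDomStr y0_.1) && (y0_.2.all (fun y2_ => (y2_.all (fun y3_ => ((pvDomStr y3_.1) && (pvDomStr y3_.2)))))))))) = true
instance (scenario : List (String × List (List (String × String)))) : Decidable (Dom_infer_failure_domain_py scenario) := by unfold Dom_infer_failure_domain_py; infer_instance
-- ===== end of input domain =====

-- B replaces A's build-a-set-plus-five-ordered-intersection-tests cascade by one rank table and a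
-- single min-by-priority pass over the faults (objective: simpler).

-- ===== PORT A =====
def infer_failure_domain_py (scenario : List (String × List (List (String × String)))) : String :=
  let targets : PySem.Set String :=
    (PySem.Dict.getD (PySem.Dict.mk scenario) "faults" []).foldl
      (fun s f => PySem.Set.add s (PySem.Dict.getD (PySem.Dict.mk f) "target" ""))
      PySem.Set.empty
  let ims_signaling_nfs : PySem.Set String := PySem.Set.ofList ["pcscf", "icscf", "scscf", "pyhss"]
  let media_nfs : PySem.Set String := PySem.Set.ofList ["rtpengine"]
  let core_nfs : PySem.Set String :=
    PySem.Set.ofList ["amf", "smf", "upf", "nrf", "scp", "ausf", "udm", "udr", "pcf"]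
  let data_nfs : PySem.Set String := PySem.Set.ofList ["mongo", "mysql", "dns"]
  if PySem.Set.inter targets media_nfs ≠ [] then "ims_media"
  else if PySem.Set.inter targets ims_signaling_nfs ≠ [] then "ims_signaling"
  else if PySem.Set.inter targets (PySem.Set.ofList ["upf", "nr_gnb"]) ≠ [] then "data_plane"
  else if PySem.Set.inter targets core_nfs ≠ [] then "core_control_plane"
  else if PySem.Set.inter targets data_nfs ≠ [] then "data_layer"
  else "unknown"

-- ===== PORT B =====
def pvRankTable : PySem.Dict String (Int × String) := PySem.Dict.ofList
  [("rtpengine", (0, "ims_media")),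
   ("pcscf", (1, "ims_signaling")), ("icscf", (1, "ims_signaling")),
   ("scscf", (1, "ims_signaling")), ("pyhss", (1, "ims_signaling")),
   ("upf", (2, "data_plane")), ("nr_gnb", (2, "data_plane")),
   ("amf", (3, "core_control_plane")), ("smf", (3, "core_control_plane")),
   ("nrf", (3, "core_control_plane")), ("scp", (3, "core_control_plane")),
   ("ausf", (3, "core_control_plane")), ("udm", (3, "core_control_plane")),
   ("udr", (3, "core_control_plane")), ("pcf", (3, "core_control_plane")),
   ("mongo", (4, "data_layer")), ("mysql", (4, "data_layer")), ("dns", (4, "data_layer"))]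

def infer_failure_domain_py_alt (scenario : List (String × List (List (String × String)))) : String :=
  let best :=
    (PySem.Dict.getD (PySem.Dict.mk scenario) "faults" []).foldl
      (fun best f =>
        match PySem.Dict.get? pvRankTable (PySem.Dict.getD (PySem.Dict.mk f) "target" "") with
        | none => best
        | some e =>
          match best with
          | none => some e
          | some b => if e.1 < b.1 then some e else some b)
      none
  match best with
  | none => "unknown"
  | some b => b.2

-- ===== PRECONDITION & SPEC =====
def Spec_infer_failure_domain_py (scenario : List (String × List (List (String × String)))) (out : String) : Prop := out = infer_failure_domain_py_alt scenario
instance (scenario : List (String × List (List (String × String)))) (out : String) : Decidable (Spec_infer_failure_domain_py scenario out) := by unfold Spec_infer_failure_domain_py; infer_instance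

-- ===== CLAIM (what is proved, stated in full; the proofs are below) =====
def Claim_equal_infer_failure_domain_py : Prop := ∀ (scenario : List (String × List (List (String × String)))), Dom_infer_failure_domain_py scenario → Spec_infer_failure_domain_py scenario (infer_failure_domain_py scenario)

-- ===== LEMMAS AND PROOFS =====

-- the rank table seen as functions: lookup, rank (5 = unknown), rank-to-domain
def pvE (t : String) : Option (Int × String) := PySem.Dict.get? pvRankTable t
def pvRk (t : String) : Int := match pvE t with | some e => e.1 | none => 5
def pvRankName (r : Int) : String :=
  if r = 0 then "ims_media" else if r = 1 then "ims_signaling" else if r = 2 then "data_plane"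
  else if r = 3 then "core_control_plane" else if r = 4 then "data_layer" else "unknown"

-- B's loop body and the representation of its accumulator by a rank
def pvStep (b : Option (Int × String)) (t : String) : Option (Int × String) :=
  match pvE t with
  | none => b
  | some e => match b with
    | none => some e
    | some b' => if e.1 < b'.1 then some e else some b'

def pvRepr (r : Int) : Option (Int × String) := if r = 5 then none else some (r, pvRankName r)

lemma pvRankTable_mk : pvRankTable = PySem.Dict.mk
  [("rtpengine", ((0:Int), "ims_media")),
   ("pcscf", (1, "ims_signaling")), ("icscf", (1, "ims_signaling")),
   ("scscf", (1, "ims_signaling")), ("pyhss", (1, "ims_signaling")),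
   ("upf", (2, "data_plane")), ("nr_gnb", (2, "data_plane")),
   ("amf", (3, "core_control_plane")), ("smf", (3, "core_control_plane")),
   ("nrf", (3, "core_control_plane")), ("scp", (3, "core_control_plane")),
   ("ausf", (3, "core_control_plane")), ("udm", (3, "core_control_plane")),
   ("udr", (3, "core_control_plane")), ("pcf", (3, "core_control_plane")),
   ("mongo", (4, "data_layer")), ("mysql", (4, "data_layer")), ("dns", (4, "data_layer"))] := rfl

lemma pvMaster (t : String) :
    ((["rtpengine"] : List String).contains t = true ↔ pvRk t = 0) ∧
    ((["pcscf", "icscf", "scscf", "pyhss"] : List String).contains t = true ↔ pvRk t = 1) ∧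
    ((["upf", "nr_gnb"] : List String).contains t = true ↔ pvRk t = 2) ∧
    ((["amf", "smf", "upf", "nrf", "scp", "ausf", "udm", "udr", "pcf"] : List String).contains t
        = true ↔ (pvRk t = 3 ∨ t = "upf")) ∧
    ((["mongo", "mysql", "dns"] : List String).contains t = true ↔ pvRk t = 4) ∧
    ((pvE t = none ∧ pvRk t = 5) ∨
      (pvE t = some (pvRk t, pvRankName (pvRk t)) ∧ 0 ≤ pvRk t ∧ pvRk t < 5)) := by
  by_cases h1 : "rtpengine" = t
  · subst h1; decide
  by_cases h2 : "pcscf" = t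
  · subst h2; decide
  by_cases h3 : "icscf" = t
  · subst h3; decide
  by_cases h4 : "scscf" = t
  · subst h4; decide
  by_cases h5 : "pyhss" = t
  · subst h5; decide
  by_cases h6 : "upf" = t
  · subst h6; decide
  by_cases h7 : "nr_gnb" = t
  · subst h7; decide
  by_cases h8 : "amf" = t
  · subst h8; decide
  by_cases h9 : "smf" = t
  · subst h9; decide
  by_cases h10 : "nrf" = t
  · subst h10; decide
  by_cases h11 : "scp" = t
  · subst h11; decide
  by_cases h12 : "ausf" = t
  · subst h12; decide
  by_cases h13 : "udm" = t
  · subst h13; decide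
  by_cases h14 : "udr" = t
  · subst h14; decide
  by_cases h15 : "pcf" = t
  · subst h15; decide
  by_cases h16 : "mongo" = t
  · subst h16; decide
  by_cases h17 : "mysql" = t
  · subst h17; decide
  by_cases h18 : "dns" = t
  · subst h18; decide
  · have e : pvE t = none := by
      unfold pvE
      rw [pvRankTable_mk]
      have b1 : ("rtpengine" == t) = false := by simpa using h1
      have b2 : ("pcscf" == t) = false := by simpa using h2
      have b3 : ("icscf" == t) = false := by simpa using h3
      have b4 : ("scscf" == t) = false := by simpa using h4
      have b5 : ("pyhss" == t) = false := by simpa using h5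
      have b6 : ("upf" == t) = false := by simpa using h6
      have b7 : ("nr_gnb" == t) = false := by simpa using h7
      have b8 : ("amf" == t) = false := by simpa using h8
      have b9 : ("smf" == t) = false := by simpa using h9
      have b10 : ("nrf" == t) = false := by simpa using h10
      have b11 : ("scp" == t) = false := by simpa using h11
      have b12 : ("ausf" == t) = false := by simpa using h12
      have b13 : ("udm" == t) = false := by simpa using h13
      have b14 : ("udr" == t) = false := by simpa using h14
      have b15 : ("pcf" == t) = false := by simpa using h15
      have b16 : ("mongo" == t) = false := by simpa using h16
      have b17 : ("mysql" == t) = false := by simpa using h17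
      have b18 : ("dns" == t) = false := by simpa using h18
      simp only [PySem.Dict.get?_mk_cons, b1, b2, b3, b4, b5, b6, b7, b8, b9, b10, b11, b12,
        b13, b14, b15, b16, b17, b18, Bool.false_eq_true, if_false]
      rfl
    have hrk : pvRk t = 5 := by simp [pvRk, e]
    have h1' : t ≠ "rtpengine" := fun hh => h1 hh.symm
    have h2' : t ≠ "pcscf" := fun hh => h2 hh.symm
    have h3' : t ≠ "icscf" := fun hh => h3 hh.symm
    have h4' : t ≠ "scscf" := fun hh => h4 hh.symm
    have h5' : t ≠ "pyhss" := fun hh => h5 hh.symm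
    have h6' : t ≠ "upf" := fun hh => h6 hh.symm
    have h7' : t ≠ "nr_gnb" := fun hh => h7 hh.symm
    have h8' : t ≠ "amf" := fun hh => h8 hh.symm
    have h9' : t ≠ "smf" := fun hh => h9 hh.symm
    have h10' : t ≠ "nrf" := fun hh => h10 hh.symm
    have h11' : t ≠ "scp" := fun hh => h11 hh.symm
    have h12' : t ≠ "ausf" := fun hh => h12 hh.symm
    have h13' : t ≠ "udm" := fun hh => h13 hh.symm
    have h14' : t ≠ "udr" := fun hh => h14 hh.symm
    have h15' : t ≠ "pcf" := fun hh => h15 hh.symm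
    have h16' : t ≠ "mongo" := fun hh => h16 hh.symm
    have h17' : t ≠ "mysql" := fun hh => h17 hh.symm
    have h18' : t ≠ "dns" := fun hh => h18 hh.symm
    refine ⟨?_, ?_, ?_, ?_, ?_, Or.inl ⟨e, hrk⟩⟩ <;>
      simp [hrk, h1', h2', h3', h4', h5', h6', h7', h8', h9', h10', h11', h12', h13', h14', h15', h16', h17', h18']

lemma pvE_spec (t : String) :
    (pvE t = none ∧ pvRk t = 5) ∨
    (pvE t = some (pvRk t, pvRankName (pvRk t)) ∧ 0 ≤ pvRk t ∧ pvRk t < 5) :=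
  (pvMaster t).2.2.2.2.2

lemma pvRk_range (t : String) : 0 ≤ pvRk t ∧ pvRk t ≤ 5 := by
  rcases pvE_spec t with ⟨_, h⟩ | ⟨_, h0, h5⟩ <;> omega

lemma pvContains_media (t : String) :
    (["rtpengine"] : List String).contains t = true ↔ pvRk t = 0 := (pvMaster t).1

lemma pvContains_sig (t : String) :
    (["pcscf", "icscf", "scscf", "pyhss"] : List String).contains t = true ↔ pvRk t = 1 :=
  (pvMaster t).2.1

lemma pvContains_plane (t : String) :
    (["upf", "nr_gnb"] : List String).contains t = true ↔ pvRk t = 2 := (pvMaster t).2.2.1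

lemma pvContains_core (t : String) :
    (["amf", "smf", "upf", "nrf", "scp", "ausf", "udm", "udr", "pcf"] : List String).contains t
      = true ↔ (pvRk t = 3 ∨ t = "upf") := (pvMaster t).2.2.2.1

lemma pvContains_data (t : String) :
    (["mongo", "mysql", "dns"] : List String).contains t = true ↔ pvRk t = 4 :=
  (pvMaster t).2.2.2.2.1

lemma pv_inter_ne_nil {α : Type} (faults : List α) (g : α → String) (S : List String) :
    (PySem.Set.inter
        (faults.foldl (fun s f => PySem.Set.add s (g f)) PySem.Set.empty) S ≠ []) ↔
      ∃ t ∈ faults.map g, S.contains t = true := by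
  have h1 : faults.foldl (fun s f => PySem.Set.add s (g f)) PySem.Set.empty
      = PySem.Set.ofList (faults.map g) := by
    rw [PySem.Set.ofList_eq_foldl, List.foldl_map]
    rfl
  rw [h1]
  show (PySem.Set.ofList (faults.map g)).filter (fun x => S.contains x) ≠ [] ↔ _
  rw [Ne, List.filter_eq_nil_iff]
  push Not
  simp [PySem.Set.mem_ofList]

lemma pvStep_repr (r : Int) (h0 : 0 ≤ r) (h5 : r ≤ 5) (t : String) :
    pvStep (pvRepr r) t = pvRepr (min r (pvRk t)) := by
  rcases pvE_spec t with ⟨he, hr⟩ | ⟨he, hr0, hr5⟩ <;> unfold pvStep pvRepr <;> rw [he] <;>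
    dsimp only
  · rw [min_eq_left (by omega)]
  · by_cases h : r = 5
    · rw [if_pos h]
      dsimp only
      rw [min_eq_right (by omega), if_neg (by omega)]
    · rw [if_neg h]
      dsimp only
      by_cases hlt : pvRk t < r
      · rw [if_pos hlt, min_eq_right (by omega), if_neg (by omega)]
      · rw [if_neg hlt, min_eq_left (by omega), if_neg h]

lemma pvFoldl_step (ts : List String) :
    ∀ r : Int, 0 ≤ r → r ≤ 5 →
      ts.foldl pvStep (pvRepr r) = pvRepr ((ts.map pvRk).foldl min r) := by
  induction ts with
  | nil => intro r _ _; rfl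
  | cons t ts ih =>
    intro r h0 h5
    have hrt := pvRk_range t
    rw [List.map_cons, List.foldl_cons, List.foldl_cons, pvStep_repr r h0 h5 t]
    exact ih (min r (pvRk t)) (le_min h0 hrt.1) (le_trans (min_le_left _ _) h5)

lemma pvB_fold (faults : List (List (String × String))) :
    faults.foldl
      (fun best f =>
        match PySem.Dict.get? pvRankTable (PySem.Dict.getD (PySem.Dict.mk f) "target" "") with
        | none => best
        | some e =>
          match best with
          | none => some e
          | some b => if e.1 < b.1 then some e else some b)
      none
    = pvRepr (((faults.map (fun f => PySem.Dict.getD (PySem.Dict.mk f) "target" "")).map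
        pvRk).foldl min 5) := by
  have h := pvFoldl_step
    (faults.map (fun f => PySem.Dict.getD (PySem.Dict.mk f) "target" "")) 5 (by omega) (by omega)
  rw [← h, List.foldl_map]
  rfl

-- ===== VERDICT (by name: the statement is the Claim_ definition above) =====
theorem infer_failure_domain_py_spec : Claim_equal_infer_failure_domain_py := by
  intro scenario _
  unfold Spec_infer_failure_domain_py
  unfold infer_failure_domain_py infer_failure_domain_py_alt
  simp only [pv_inter_ne_nil, pvB_fold,
    show PySem.Set.ofList ["rtpengine"] = (["rtpengine"] : List String) from rfl,
    show PySem.Set.ofList ["pcscf", "icscf", "scscf", "pyhss"]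
      = (["pcscf", "icscf", "scscf", "pyhss"] : List String) from rfl,
    show PySem.Set.ofList ["upf", "nr_gnb"] = (["upf", "nr_gnb"] : List String) from rfl,
    show PySem.Set.ofList ["amf", "smf", "upf", "nrf", "scp", "ausf", "udm", "udr", "pcf"]
      = (["amf", "smf", "upf", "nrf", "scp", "ausf", "udm", "udr", "pcf"] : List String) from rfl,
    show PySem.Set.ofList ["mongo", "mysql", "dns"]
      = (["mongo", "mysql", "dns"] : List String) from rfl,
    pvContains_media, pvContains_sig, pvContains_plane, pvContains_core, pvContains_data]
  set ts := (PySem.Dict.getD (PySem.Dict.mk scenario) "faults" []).map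
    (fun f => PySem.Dict.getD (PySem.Dict.mk f) "target" "") with hts
  set l := ts.map pvRk with hl
  set m := l.foldl min 5 with hm
  have hle := PySem.List.foldl_min_le l 5
  have hmem := PySem.List.foldl_min_mem l 5
  have hrange : ∀ y ∈ l, 0 ≤ y ∧ y ≤ 5 := by
    intro y hy
    obtain ⟨t, _, rfl⟩ := List.mem_map.mp hy
    exact pvRk_range t
  have hm0 : 0 ≤ m := by
    rcases hmem with h | h
    · omega
    · exact (hrange m h).1
  have hwit : m ≠ 5 → ∃ t ∈ ts, pvRk t = m := by
    intro h
    rcases hmem with h' | h'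
    · omega
    · obtain ⟨t, ht, he⟩ := List.mem_map.mp h'
      exact ⟨t, ht, he⟩
  have hub : ∀ t ∈ ts, m ≤ pvRk t := by
    intro t ht
    exact hle.2 _ (List.mem_map.mpr ⟨t, ht, rfl⟩)
  by_cases c0 : ∃ t ∈ ts, pvRk t = 0
  · obtain ⟨t, ht, h⟩ := c0
    have hm' : m = 0 := by have := hub t ht; omega
    rw [if_pos ⟨t, ht, h⟩, hm']
    rfl
  · rw [if_neg c0]
    by_cases c1 : ∃ t ∈ ts, pvRk t = 1
    · obtain ⟨t, ht, h⟩ := c1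
      have hm' : m = 1 := by
        have := hub t ht
        have h0 : m ≠ 0 := fun h' =>
          c0 ((hwit (by omega)).imp fun t' ⟨ht', he'⟩ => ⟨ht', by omega⟩)
        omega
      rw [if_pos ⟨t, ht, h⟩, hm']
      rfl
    · rw [if_neg c1]
      by_cases c2 : ∃ t ∈ ts, pvRk t = 2
      · obtain ⟨t, ht, h⟩ := c2
        have hm' : m = 2 := by
          have := hub t ht
          have h0 : m ≠ 0 := fun h' =>
            c0 ((hwit (by omega)).imp fun t' ⟨ht', he'⟩ => ⟨ht', by omega⟩)
          have h1 : m ≠ 1 := fun h' =>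
            c1 ((hwit (by omega)).imp fun t' ⟨ht', he'⟩ => ⟨ht', by omega⟩)
          omega
        rw [if_pos ⟨t, ht, h⟩, hm']
        rfl
      · rw [if_neg c2]
        by_cases c3 : ∃ t ∈ ts, (pvRk t = 3 ∨ t = "upf")
        · obtain ⟨t, ht, h⟩ := c3
          have h3 : pvRk t = 3 := by
            rcases h with h | h
            · exact h
            · exact absurd ⟨t, ht, by rw [h]; decide⟩ c2
          have hm' : m = 3 := by
            have := hub t ht
            have h0 : m ≠ 0 := fun h' =>
              c0 ((hwit (by omega)).imp fun t' ⟨ht', he'⟩ => ⟨ht', by omega⟩)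
            have h1 : m ≠ 1 := fun h' =>
              c1 ((hwit (by omega)).imp fun t' ⟨ht', he'⟩ => ⟨ht', by omega⟩)
            have h2 : m ≠ 2 := fun h' =>
              c2 ((hwit (by omega)).imp fun t' ⟨ht', he'⟩ => ⟨ht', by omega⟩)
            omega
          rw [if_pos ⟨t, ht, h⟩, hm']
          rfl
        · rw [if_neg c3]
          by_cases c4 : ∃ t ∈ ts, pvRk t = 4
          · obtain ⟨t, ht, h⟩ := c4
            have hm' : m = 4 := by
              have := hub t ht
              have h0 : m ≠ 0 := fun h' =>
                c0 ((hwit (by omega)).imp fun t' ⟨ht', he'⟩ => ⟨ht', by omega⟩)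
              have h1 : m ≠ 1 := fun h' =>
                c1 ((hwit (by omega)).imp fun t' ⟨ht', he'⟩ => ⟨ht', by omega⟩)
              have h2 : m ≠ 2 := fun h' =>
                c2 ((hwit (by omega)).imp fun t' ⟨ht', he'⟩ => ⟨ht', by omega⟩)
              have h3 : m ≠ 3 := fun h' =>
                c3 ((hwit (by omega)).imp fun t' ⟨ht', he'⟩ => ⟨ht', Or.inl (by omega)⟩)
              omega
            rw [if_pos ⟨t, ht, h⟩, hm']
            rfl
          · rw [if_neg c4]
            have hm5 : m = 5 := by
              by_contra h
              obtain ⟨t, ht, he⟩ := hwit h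
              have h1 := hle.1
              have h0' : m ≠ 0 := fun h' => c0 ⟨t, ht, by omega⟩
              have h1' : m ≠ 1 := fun h' => c1 ⟨t, ht, by omega⟩
              have h2' : m ≠ 2 := fun h' => c2 ⟨t, ht, by omega⟩
              have h3' : m ≠ 3 := fun h' => c3 ⟨t, ht, Or.inl (by omega)⟩
              have h4' : m ≠ 4 := fun h' => c4 ⟨t, ht, by omega⟩
              omega
            rw [hm5]
            rfl
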